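-- pv_equiv track=rewrite | github.com/tzoref/Learning_Progress_Tracker_python | Learning Progress Tracker (Python)/task/task.py | _stat_roller
-- ===== SOURCE A (Python) =====
-- def _stat_roller(enlisted):
--     roll_out = list()
--     roll_in = list()
--     for cab in enlisted.keys():
--         if enlisted[cab] == max(enlisted.values()):
--             roll_out.append(cab)
--         if enlisted[cab] == min(enlisted.values()):
--             roll_in.append(cab)
--     [roll_in.remove(topic) for topic in roll_out if topic in roll_in]
--     if len(roll_in) == 0:
--         roll_in.insert(0, "n/a")
--     return roll_out, roll_in
-- ===== SOURCE B (Python) =====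
-- def _stat_roller(enlisted):
--     groups = {}
--     for topic, n in enlisted.items():
--         groups.setdefault(n, []).append(topic)
--     if not groups:
--         return [], ["n/a"]
--     mx = max(groups)
--     mn = min(groups)
--     roll_out = groups[mx]
--     roll_in = [] if mx == mn else groups[mn]
--     if not roll_in:
--         roll_in.insert(0, "n/a")
--     return roll_out, roll_in
-- ===== Notes on version B (the rewrite author's own statement) =====
-- stated objective: simpler
-- what changed: One pass groups topics by enrollment count into a dict, then picks the max-count and min-count buckets directly, instead of A's loop that recomputes max()/min() of all values at every key and then deletes overlaps from roll_in.
import Mathlib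
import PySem

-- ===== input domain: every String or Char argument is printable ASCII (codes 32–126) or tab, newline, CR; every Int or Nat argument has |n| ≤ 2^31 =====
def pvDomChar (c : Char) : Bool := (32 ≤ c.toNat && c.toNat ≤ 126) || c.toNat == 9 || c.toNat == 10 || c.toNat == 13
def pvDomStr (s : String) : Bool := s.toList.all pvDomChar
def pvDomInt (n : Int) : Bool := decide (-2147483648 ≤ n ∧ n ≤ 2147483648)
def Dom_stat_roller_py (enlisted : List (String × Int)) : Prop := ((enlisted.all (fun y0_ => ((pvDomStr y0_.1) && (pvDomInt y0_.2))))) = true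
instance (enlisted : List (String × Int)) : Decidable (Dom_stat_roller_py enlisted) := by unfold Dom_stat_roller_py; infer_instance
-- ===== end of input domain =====

-- B replaces A's per-key rescan of max()/min() of all values (and the later cross-list removal)
-- by one grouping pass count → topics followed by two direct bucket lookups.

-- ===== PORT A =====
-- literal port of _stat_roller: the dict parameter is the association list with unique keys (Pre_);
-- `enlisted[cab] == max(enlisted.values())` is the Option-level equality `d.get? cab = max? d.values`
-- (exact: cab is a key, so get? is `some`, and values is nonempty whenever the loop body runs).
def stat_roller_py (enlisted : List (String × Int)) : List String × List String :=
  let d : PySem.Dict String Int := PySem.Dict.mk enlisted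
  -- for cab in enlisted.keys(): two guarded appends
  let p := d.keys.foldl (fun (st : List String × List String) cab =>
      let st1 := if d.get? cab = PySem.List.max? d.values (fun y => y) then (st.1 ++ [cab], st.2) else st
      if d.get? cab = PySem.List.min? d.values (fun y => y) then (st1.1, st1.2 ++ [cab]) else st1)
    (([] : List String), ([] : List String))
  -- [roll_in.remove(topic) for topic in roll_out if topic in roll_in]
  let roll_in := p.1.foldl (fun ri t => if t ∈ ri then (PySem.List.remove? ri t).getD ri else ri) p.2
  -- if len(roll_in) == 0: roll_in.insert(0, "n/a")
  let roll_in2 := if roll_in.length = 0 then PySem.List.insert roll_in 0 "n/a" else roll_in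
  (p.1, roll_in2)

-- ===== PORT B =====
-- literal port of Source B: groups.setdefault(n, []).append(topic) is Dict.modify n [] (· ++ [topic])
def stat_roller_py_alt (enlisted : List (String × Int)) : List String × List String :=
  let groups : PySem.Dict Int (List String) :=
    enlisted.foldl (fun g kv => g.modify kv.2 [] (fun l => l ++ [kv.1])) PySem.Dict.empty
  match PySem.List.max? groups.keys (fun y => y), PySem.List.min? groups.keys (fun y => y) with
  | some mx, some mn =>
    let roll_out := groups.getD mx []
    let roll_in := if mx = mn then [] else groups.getD mn []
    (roll_out, if roll_in.isEmpty then ["n/a"] else roll_in)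
  | _, _ => ([], ["n/a"])   -- `if not groups: return [], ["n/a"]` (keys empty ↔ enlisted empty)

-- ===== PRECONDITION & SPEC =====
-- Pre_ only requires the association list to have pairwise-distinct keys: a list with a duplicated
-- key does not represent any Python dict (the dict the Python functions receive has unique keys),
-- so nothing is excluded that the Python A returns on.
def Pre_stat_roller_py (enlisted : List (String × Int)) : Prop := (enlisted.map Prod.fst).Nodup
instance (enlisted : List (String × Int)) : Decidable (Pre_stat_roller_py enlisted) := by unfold Pre_stat_roller_py; infer_instance
def pvWitness_stat_roller_py : (List (String × Int)) := [("a", 1), ("b", 2)]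
def Spec_stat_roller_py (enlisted : List (String × Int)) (out : List String × List String) : Prop := out = stat_roller_py_alt enlisted
instance (enlisted : List (String × Int)) (out : List String × List String) : Decidable (Spec_stat_roller_py enlisted out) := by unfold Spec_stat_roller_py; infer_instance

-- ===== CLAIM (what is proved, stated in full; the proofs are below) =====
def Claim_equal_stat_roller_py : Prop := ∀ (enlisted : List (String × Int)), Dom_stat_roller_py enlisted → Pre_stat_roller_py enlisted → Spec_stat_roller_py enlisted (stat_roller_py enlisted)

-- ===== LEMMAS AND PROOFS =====

-- topics (in list order) whose enrollment count is w — both programs' result components reduce to this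
def pvSel (enlisted : List (String × Int)) (w : Int) : List String :=
  (enlisted.filter (fun kv => kv.2 == w)).map Prod.fst

-- A's single loop with two independently guarded accumulators, in closed form
theorem pv_pairloop_eq (d : PySem.Dict String Int) (ks : List String) :
    ks.foldl (fun (st : List String × List String) cab =>
      let st1 := if d.get? cab = PySem.List.max? d.values (fun y => y) then (st.1 ++ [cab], st.2) else st
      if d.get? cab = PySem.List.min? d.values (fun y => y) then (st1.1, st1.2 ++ [cab]) else st1)
      (([] : List String), ([] : List String))
    = (ks.filter (fun cab => decide (d.get? cab = PySem.List.max? d.values (fun y => y))),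
       ks.filter (fun cab => decide (d.get? cab = PySem.List.min? d.values (fun y => y)))) := by
  have hstep : (fun (st : List String × List String) cab =>
      let st1 := if d.get? cab = PySem.List.max? d.values (fun y => y) then (st.1 ++ [cab], st.2) else st
      if d.get? cab = PySem.List.min? d.values (fun y => y) then (st1.1, st1.2 ++ [cab]) else st1)
      = (fun (st : List String × List String) cab =>
        (if d.get? cab = PySem.List.max? d.values (fun y => y) then st.1 ++ [cab] else st.1,
         if d.get? cab = PySem.List.min? d.values (fun y => y) then st.2 ++ [cab] else st.2)) := by
    funext st cab
    dsimp only []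
    split_ifs <;> rfl
  rw [hstep,
    PySem.List.foldl_prod_mk
      (f := fun acc cab => if d.get? cab = PySem.List.max? d.values (fun y => y) then acc ++ [cab] else acc)
      (g := fun acc cab => if d.get? cab = PySem.List.min? d.values (fun y => y) then acc ++ [cab] else acc),
    PySem.List.foldl_append_ite_eq_filter, PySem.List.foldl_append_ite_eq_filter]
  simp

-- keys whose dict value is w, as a filter of the association list (unique keys)
theorem pv_keys_filter (enlisted : List (String × Int)) (hnd : (enlisted.map Prod.fst).Nodup) (w : Int) :
    (enlisted.map Prod.fst).filter (fun c => decide ((PySem.Dict.mk enlisted).get? c = some w))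
    = pvSel enlisted w := by
  unfold pvSel
  rw [List.filter_map]
  congr 1
  apply List.filter_congr
  intro kv hkv
  have hget : (PySem.Dict.mk enlisted).get? kv.1 = some kv.2 := by
    apply PySem.Dict.get?_of_mem_items _ (by simpa using hkv)
    simpa using hnd
  simp [Function.comp, hget, beq_eq_decide]

-- B's grouping pass: the bucket at v, and the key list
theorem pv_groups_getD (enlisted : List (String × Int)) (v : Int) :
    (enlisted.foldl (fun g kv => g.modify kv.2 [] (fun l => l ++ [kv.1])) PySem.Dict.empty).getD v []
    = pvSel enlisted v := by
  have h : enlisted.foldl (fun g kv => g.modify kv.2 [] (fun l => l ++ [kv.1])) PySem.Dict.empty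
      = (enlisted.map (fun kv => (kv.2, kv.1))).foldl
          (fun g p => g.modify p.1 [] (fun l => l ++ [p.2])) PySem.Dict.empty := by
    rw [List.foldl_map]
  rw [h, PySem.Dict.getD_foldl_modify_append]
  unfold pvSel
  simp [List.filter_map, Function.comp_def]

theorem pv_groups_keys (enlisted : List (String × Int)) :
    (enlisted.foldl (fun g kv => g.modify kv.2 [] (fun l => l ++ [kv.1])) PySem.Dict.empty).keys
    = PySem.Set.ofList (enlisted.map Prod.snd) := by
  rw [PySem.Dict.keys_foldl_modify_key enlisted (fun kv => kv.2) [] (fun _ kv => fun l => l ++ [kv.1])]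
  simp [PySem.Dict.keys, PySem.Dict.empty, PySem.Set.update_nil_left]

-- max/min over Int lists depend only on membership (the extremal VALUE is unique)
theorem pv_max_congr (xs ys : List Int) (h : ∀ v, v ∈ xs ↔ v ∈ ys) :
    PySem.List.max? xs (fun y => y) = PySem.List.max? ys (fun y => y) := by
  rcases hx : PySem.List.max? xs (fun y => y) with _ | a
  · rcases hy : PySem.List.max? ys (fun y => y) with _ | b
    · rfl
    · rw [PySem.List.max?_eq_none_iff] at hx
      have := (h b).mpr (PySem.List.max?_mem hy)
      simp [hx] at this
  · rcases hy : PySem.List.max? ys (fun y => y) with _ | b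
    · rw [PySem.List.max?_eq_none_iff] at hy
      have := (h a).mp (PySem.List.max?_mem hx)
      simp [hy] at this
    · have h1 : a ≤ b := PySem.List.max?_isMax hy a ((h a).mp (PySem.List.max?_mem hx))
      have h2 : b ≤ a := PySem.List.max?_isMax hx b ((h b).mpr (PySem.List.max?_mem hy))
      exact congrArg _ (le_antisymm h1 h2)

theorem pv_min_congr (xs ys : List Int) (h : ∀ v, v ∈ xs ↔ v ∈ ys) :
    PySem.List.min? xs (fun y => y) = PySem.List.min? ys (fun y => y) := by
  rcases hx : PySem.List.min? xs (fun y => y) with _ | a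
  · rcases hy : PySem.List.min? ys (fun y => y) with _ | b
    · rfl
    · rw [PySem.List.min?_eq_none_iff] at hx
      have := (h b).mpr (PySem.List.min?_mem hy)
      simp [hx] at this
  · rcases hy : PySem.List.min? ys (fun y => y) with _ | b
    · rw [PySem.List.min?_eq_none_iff] at hy
      have := (h a).mp (PySem.List.min?_mem hx)
      simp [hy] at this
    · have h1 : b ≤ a := PySem.List.min?_isMin hy a ((h a).mp (PySem.List.min?_mem hx))
      have h2 : a ≤ b := PySem.List.min?_isMin hx b ((h b).mpr (PySem.List.min?_mem hy))
      exact congrArg _ (le_antisymm h2 h1)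

-- removing every element of l from l itself (first occurrences, in order) empties it
theorem pv_remove_self (l : List String) :
    l.foldl (fun ri t => if t ∈ ri then (PySem.List.remove? ri t).getD ri else ri) l = [] := by
  induction l with
  | nil => rfl
  | cons t tl ih =>
    have hrem : PySem.List.remove? (t :: tl) t = some tl := by
      simp [PySem.List.remove?, List.idxOf?]
      exact ⟨0, by simp [List.findIdx?_cons], rfl⟩
    simp only [List.foldl_cons, if_pos (List.mem_cons_self), hrem, Option.getD_some]
    exact ih

-- removal loop is the identity when nothing removed is present
theorem pv_remove_disjoint (out ri : List String) (h : ∀ t ∈ out, t ∉ ri) :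
    out.foldl (fun ri t => if t ∈ ri then (PySem.List.remove? ri t).getD ri else ri) ri = ri := by
  induction out with
  | nil => rfl
  | cons t tl ih =>
    simp only [List.foldl_cons, if_neg (h t List.mem_cons_self)]
    exact ih fun t' ht' => h t' (List.mem_cons_of_mem _ ht')

-- ===== VERDICT (by name: the statement is the Claim_ definition above) =====
theorem stat_roller_py_spec : Claim_equal_stat_roller_py := by
  intro enlisted _hdom hnd
  unfold Spec_stat_roller_py
  by_cases he : enlisted = []
  · subst he; rfl
  · have hvne : enlisted.map Prod.snd ≠ [] := by simpa using he
    obtain ⟨M, hM⟩ : ∃ M, PySem.List.max? (enlisted.map Prod.snd) (fun y => y) = some M := by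
      rcases h : PySem.List.max? (enlisted.map Prod.snd) (fun y => y) with _ | a
      · exact absurd ((PySem.List.max?_eq_none_iff _ _).mp h) hvne
      · exact ⟨a, rfl⟩
    obtain ⟨m, hm⟩ : ∃ m, PySem.List.min? (enlisted.map Prod.snd) (fun y => y) = some m := by
      rcases h : PySem.List.min? (enlisted.map Prod.snd) (fun y => y) with _ | a
      · exact absurd ((PySem.List.min?_eq_none_iff _ _).mp h) hvne
      · exact ⟨a, rfl⟩
    have hkeys : (PySem.Dict.mk enlisted).keys = enlisted.map Prod.fst := by simp [PySem.Dict.keys]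
    have hvalues : (PySem.Dict.mk enlisted).values = enlisted.map Prod.snd := by simp [PySem.Dict.values]
    have hA : stat_roller_py enlisted =
        (pvSel enlisted M,
         let ri := (pvSel enlisted M).foldl
             (fun ri t => if t ∈ ri then (PySem.List.remove? ri t).getD ri else ri) (pvSel enlisted m)
         if ri.length = 0 then PySem.List.insert ri 0 "n/a" else ri) := by
      unfold stat_roller_py
      simp only [pv_pairloop_eq]
      simp only [hkeys, hvalues, hM, hm]
      simp only [pv_keys_filter enlisted hnd M, pv_keys_filter enlisted hnd m]
    have hBkeys := pv_groups_keys enlisted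
    have hBmax : PySem.List.max? (enlisted.foldl (fun g kv => g.modify kv.2 [] (fun l => l ++ [kv.1]))
        PySem.Dict.empty).keys (fun y => y) = some M := by
      rw [hBkeys, pv_max_congr _ (enlisted.map Prod.snd) (fun v => PySem.Set.mem_ofList _ v), hM]
    have hBmin : PySem.List.min? (enlisted.foldl (fun g kv => g.modify kv.2 [] (fun l => l ++ [kv.1]))
        PySem.Dict.empty).keys (fun y => y) = some m := by
      rw [hBkeys, pv_min_congr _ (enlisted.map Prod.snd) (fun v => PySem.Set.mem_ofList _ v), hm]
    have hB : stat_roller_py_alt enlisted =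
        (pvSel enlisted M,
         let ri := if M = m then ([] : List String) else pvSel enlisted m
         if ri.isEmpty then ["n/a"] else ri) := by
      unfold stat_roller_py_alt
      simp only [hBmax, hBmin, pv_groups_getD]
    have hRIne : pvSel enlisted m ≠ [] := by
      have hmem : m ∈ enlisted.map Prod.snd := PySem.List.min?_mem hm
      obtain ⟨kv, hkv, hkv2⟩ := List.mem_map.mp hmem
      have : kv.1 ∈ pvSel enlisted m :=
        List.mem_map.mpr ⟨kv, List.mem_filter.mpr ⟨hkv, by simp [hkv2]⟩, rfl⟩
      exact fun h0 => by simp [h0] at this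
    rw [hA, hB]
    by_cases hMm : M = m
    · subst hMm
      simp only [pv_remove_self (pvSel enlisted M), List.length_nil]
      rfl
    · have hdisj : ∀ t ∈ pvSel enlisted M, t ∉ pvSel enlisted m := by
        intro t htO htI
        obtain ⟨kv, hkvf, hkv1⟩ := List.mem_map.mp htO
        obtain ⟨kv', hkvf', hkv1'⟩ := List.mem_map.mp htI
        obtain ⟨hkvm, hkv2⟩ := List.mem_filter.mp hkvf
        obtain ⟨hkvm', hkv2'⟩ := List.mem_filter.mp hkvf'
        have hg : (PySem.Dict.mk enlisted).get? kv.1 = some kv.2 :=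
          PySem.Dict.get?_of_mem_items _ (by simpa using hkvm) (by simpa using hnd)
        have hg' : (PySem.Dict.mk enlisted).get? kv'.1 = some kv'.2 :=
          PySem.Dict.get?_of_mem_items _ (by simpa using hkvm') (by simpa using hnd)
        rw [hkv1] at hg
        rw [hkv1'] at hg'
        have hv : kv.2 = kv'.2 := by
          have := hg.symm.trans hg'
          injection this
        apply hMm
        calc M = kv.2 := (eq_of_beq hkv2).symm
          _ = kv'.2 := hv
          _ = m := eq_of_beq hkv2'
      simp only [pv_remove_disjoint _ _ hdisj, if_neg hMm]
      have h1 : ¬ (pvSel enlisted m).length = 0 := by simp [List.length_eq_zero_iff, hRIne]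
      have h2 : (pvSel enlisted m).isEmpty = false := by simp [hRIne]
      simp [h1, h2]
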